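-- pv_equiv track=rewrite | github.com/ufal/flexiconv | flexiconv/io/vert.py | _guess_column_names
-- ===== SOURCE A (Python) =====
-- from typing import List, Optional
--
-- def _guess_column_names(ncols: int) -> List[str]:
--     """Heuristic default column names when no registry is available."""
--     if ncols == 1:
--         return ["form"]
--     if ncols == 2:
--         return ["form", "lemma"]
--     if ncols >= 3:
--         return ["form", "lemma", "pos"] + [f"col{i}" for i in range(4, ncols + 1)]
--     return [f"col{i}" for i in range(1, ncols + 1)]
-- ===== SOURCE B (Python) =====
-- def _guess_column_names(ncols: int):
--     """Generate numbered names col1..colN, then overwrite the leading entries with defaults."""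
--     names = [f"col{i}" for i in range(1, ncols + 1)]
--     for i, name in enumerate(["form", "lemma", "pos"]):
--         if i < len(names):
--             names[i] = name
--     return names
-- ===== Notes on version B (the rewrite author's own statement) =====
-- stated objective: alternative
-- what changed: Replaces A's four-way branch on ncols with a generate-then-patch scheme: build col1..colN uniformly, then overwrite the first up-to-three entries in place with the default names.
import Mathlib
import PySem

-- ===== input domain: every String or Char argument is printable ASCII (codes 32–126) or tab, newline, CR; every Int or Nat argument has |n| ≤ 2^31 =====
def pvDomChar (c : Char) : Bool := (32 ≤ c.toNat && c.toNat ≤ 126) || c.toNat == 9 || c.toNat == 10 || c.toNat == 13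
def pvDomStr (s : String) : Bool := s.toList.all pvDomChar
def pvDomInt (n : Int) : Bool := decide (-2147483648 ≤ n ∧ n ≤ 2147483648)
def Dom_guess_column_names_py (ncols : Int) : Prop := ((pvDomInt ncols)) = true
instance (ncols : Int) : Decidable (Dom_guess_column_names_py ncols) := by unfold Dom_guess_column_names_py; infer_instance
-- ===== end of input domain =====

-- B replaces A's four-way branch with a generate-then-patch pass: build col1..colN, then overwrite the first up-to-three entries with default names (alternative decomposition; same cost).


-- ===== PORT A =====
def guess_column_names_py (ncols : Int) : List String :=
  if ncols = 1 then ["form"]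
  else if ncols = 2 then ["form", "lemma"]
  else if 3 ≤ ncols then
    ["form", "lemma", "pos"] ++ (PySem.List.pyRange 4 (ncols + 1) 1).map (fun i => "col" ++ PySem.Int.toStr i)
  else
    (PySem.List.pyRange 1 (ncols + 1) 1).map (fun i => "col" ++ PySem.Int.toStr i)

-- ===== PORT B =====
def guess_column_names_py_alt (ncols : Int) : List String :=
  let names := (PySem.List.pyRange 1 (ncols + 1) 1).map (fun i => "col" ++ PySem.Int.toStr i)
  (PySem.List.enumerate ["form", "lemma", "pos"] 0).foldl
    (fun acc p => if p.1 < (acc.length : Int) then acc.set p.1.toNat p.2 else acc) names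

-- ===== PRECONDITION & SPEC =====
def Spec_guess_column_names_py (ncols : Int) (out : List String) : Prop := out = guess_column_names_py_alt ncols
instance (ncols : Int) (out : List String) : Decidable (Spec_guess_column_names_py ncols out) := by unfold Spec_guess_column_names_py; infer_instance

-- ===== CLAIM (what is proved, stated in full; the proofs are below) =====
def Claim_equal_guess_column_names_py : Prop := ∀ (ncols : Int), Dom_guess_column_names_py ncols → Spec_guess_column_names_py ncols (guess_column_names_py ncols)

-- ===== LEMMAS AND PROOFS =====
-- patching B's foldl on a list with at least three elements writes the three defaults
theorem pv_patch3 (x y z : String) (rest : List String) :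
    (PySem.List.enumerate ["form", "lemma", "pos"] 0).foldl
      (fun acc p => if p.1 < (acc.length : Int) then acc.set p.1.toNat p.2 else acc) (x :: y :: z :: rest)
    = "form" :: "lemma" :: "pos" :: rest := by
  simp only [PySem.List.enumerate, List.foldl, List.length_cons]
  split_ifs <;> simp_all <;> omega

-- B in closed form when ncols ≥ 3
theorem pv_alt_big (ncols : Int) (h : 3 ≤ ncols) :
    guess_column_names_py_alt ncols
    = ["form", "lemma", "pos"] ++ (PySem.List.pyRange 4 (ncols + 1) 1).map (fun i => "col" ++ PySem.Int.toStr i) := by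
  unfold guess_column_names_py_alt
  rw [PySem.List.pyRange_one_cons (by omega), PySem.List.pyRange_one_cons (by omega),
      PySem.List.pyRange_one_cons (by omega)]
  show (PySem.List.enumerate ["form", "lemma", "pos"] 0).foldl _ _ = _
  rw [List.map_cons, List.map_cons, List.map_cons, pv_patch3]
  norm_num

-- ===== VERDICT (by name: the statement is the Claim_ definition above) =====
theorem guess_column_names_py_spec : Claim_equal_guess_column_names_py := by
  intro ncols _
  unfold Spec_guess_column_names_py guess_column_names_py
  by_cases h1 : ncols = 1
  · subst h1; decide
  · by_cases h2 : ncols = 2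
    · subst h2; decide
    · by_cases h3 : 3 ≤ ncols
      · rw [pv_alt_big ncols h3]
        simp [h1, h2, h3]
      · simp only [h1, h2, h3, if_false]
        unfold guess_column_names_py_alt
        rw [PySem.List.pyRange_one_eq_nil (by omega)]
        simp [PySem.List.enumerate, List.foldl]
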